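-- pv_equiv track=rewrite | github.com/lugia574/algorism | venv/BeakJoon_7568_body comparison.py | body_rank
-- ===== SOURCE A (Python) =====
-- def body_rank(n,body_list):
--
--     rank_list = [0]*n
--
--     for x in range(len(body_list)):
--         rank = 1
--         for y in range(len(body_list)):
--             if body_list[x][0] < body_list[y][0] and body_list[x][1] < body_list[y][1]:
--                 rank += 1
--         rank_list[x]= rank
--
--
--     return rank_list
-- ===== SOURCE B (Python) =====
-- def body_rank(n, body_list):
--     # Group duplicate points: compute each distinct point's rank once.
--     counts = {}
--     for p in body_list:
--         counts[p] = counts.get(p, 0) + 1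
--     distinct = list(counts)
--     rank_of = {}
--     for p in distinct:
--         r = 1
--         for q in distinct:
--             if p[0] < q[0] and p[1] < q[1]:
--                 r += counts[q]
--         rank_of[p] = r
--     out = [0] * n
--     for i, p in enumerate(body_list):
--         out[i] = rank_of[p]
--     return out
-- ===== Notes on version B (the rewrite author's own statement) =====
-- stated objective: alternative
-- what changed: B builds a frequency dict of the points and computes each distinct point's rank once over the distinct points weighted by multiplicity (O(d^2+n) for d distinct points), instead of A's nested O(n^2) scan over all index pairs.
import Mathlib
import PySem

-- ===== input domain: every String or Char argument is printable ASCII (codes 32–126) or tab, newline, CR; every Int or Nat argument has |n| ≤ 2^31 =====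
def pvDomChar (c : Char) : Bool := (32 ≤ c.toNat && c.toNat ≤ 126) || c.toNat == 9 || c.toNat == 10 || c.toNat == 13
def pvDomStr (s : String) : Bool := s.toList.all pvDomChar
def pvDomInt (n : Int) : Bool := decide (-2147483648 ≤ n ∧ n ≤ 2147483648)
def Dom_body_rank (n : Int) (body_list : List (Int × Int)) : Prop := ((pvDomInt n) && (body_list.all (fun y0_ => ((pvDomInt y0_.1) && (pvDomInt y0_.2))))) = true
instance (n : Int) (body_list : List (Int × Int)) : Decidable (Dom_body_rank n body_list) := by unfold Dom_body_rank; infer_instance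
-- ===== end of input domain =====

-- B groups duplicate points with a frequency dict and computes each distinct point's rank once,
-- weighted by multiplicity, instead of A's nested scan over all index pairs (alternative algorithm).


-- ===== PORT A =====
def body_rank (n : Int) (body_list : List (Int × Int)) : List Int :=
  -- rank_list = [0]*n  (a negative n gives the empty list, as in Python)
  let rank_list : List Int := List.replicate n.toNat 0
  -- for x in range(len(body_list)): … rank_list[x] = rank
  (PySem.List.pyRange 0 (body_list.length : Int) 1).foldl (fun rank_list x =>
    -- rank = 1; for y in range(len(body_list)): if … : rank += 1
    let rank : Int :=
      (PySem.List.pyRange 0 (body_list.length : Int) 1).foldl (fun rank y =>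
        if (PySem.List.pyGetD body_list x (0, 0)).1 < (PySem.List.pyGetD body_list y (0, 0)).1 ∧
           (PySem.List.pyGetD body_list x (0, 0)).2 < (PySem.List.pyGetD body_list y (0, 0)).2
        then rank + 1 else rank) 1
    PySem.List.pySetD rank_list x rank) rank_list

-- ===== PORT B =====
def body_rank_alt (n : Int) (body_list : List (Int × Int)) : List Int :=
  -- counts[p] = counts.get(p, 0) + 1
  let counts : PySem.Dict (Int × Int) Int :=
    body_list.foldl (fun d p => d.insert p (d.getD p 0 + 1)) PySem.Dict.empty
  -- distinct = list(counts)
  let distinct : List (Int × Int) := counts.keys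
  -- rank_of[p] = 1 + sum of counts[q] over dominating distinct q
  let rank_of : PySem.Dict (Int × Int) Int :=
    distinct.foldl (fun d p =>
      let r : Int := distinct.foldl (fun r q =>
        if p.1 < q.1 ∧ p.2 < q.2 then r + counts.getD q 0 else r) 1
      d.insert p r) PySem.Dict.empty
  -- out = [0]*n; for i, p in enumerate(body_list): out[i] = rank_of[p]
  let out : List Int := List.replicate n.toNat 0
  (PySem.List.enumerate body_list 0).foldl
    (fun out ip => PySem.List.pySetD out ip.1 (rank_of.getD ip.2 0)) out

-- ===== PRECONDITION & SPEC =====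
-- Pre_ excludes exactly the inputs where A raises IndexError: rank_list = [0]*n is too short
-- to hold one rank per person (len(body_list) > n, including negative n with a nonempty list).
def Pre_body_rank (n : Int) (body_list : List (Int × Int)) : Prop := (body_list.length : Int) ≤ n
instance (n : Int) (body_list : List (Int × Int)) : Decidable (Pre_body_rank n body_list) := by unfold Pre_body_rank; infer_instance
def pvWitness_body_rank : Int × (List (Int × Int)) := (3, [(55, 185), (58, 183), (88, 186)])
def Spec_body_rank (n : Int) (body_list : List (Int × Int)) (out : List Int) : Prop := out = body_rank_alt n body_list
instance (n : Int) (body_list : List (Int × Int)) (out : List Int) : Decidable (Spec_body_rank n body_list out) := by unfold Spec_body_rank; infer_instance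

-- ===== CLAIM (what is proved, stated in full; the proofs are below) =====
def Claim_equal_body_rank : Prop := ∀ (n : Int) (body_list : List (Int × Int)), Dom_body_rank n body_list → Pre_body_rank n body_list → Spec_body_rank n body_list (body_rank n body_list)

-- ===== LEMMAS AND PROOFS =====

-- On a Nodup list, summing `if q = a then w q else 0` picks out w a.
theorem pv_sum_map_ite_eq_nodup (e : List (Int × Int)) (a : Int × Int) (w : Int × Int → Int)
    (hn : e.Nodup) (ha : a ∈ e) :
    (e.map (fun q => if q = a then w q else 0)).sum = w a := by
  induction e with
  | nil => simp at ha
  | cons q e ih =>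
    simp only [List.nodup_cons] at hn
    simp only [List.map_cons, List.sum_cons]
    by_cases hq : q = a
    · subst hq
      have : (e.map (fun q' => if q' = q then w q' else 0)).sum = 0 := by
        apply List.sum_eq_zero
        intro x hx
        simp only [List.mem_map] at hx
        obtain ⟨y, hy, rfl⟩ := hx
        exact if_neg (fun h : y = q => hn.1 (h ▸ hy))
      simp [this]
    · have ha' : a ∈ e := by
        rcases List.mem_cons.mp ha with h | h
        · exact absurd h.symm hq
        · exact h
      rw [if_neg hq, ih hn.2 ha', zero_add]

-- Grouping: a count over l equals the multiplicity-weighted sum over any Nodup cover of l.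
theorem pv_grouping (l e : List (Int × Int)) (c : Int × Int → Bool)
    (hn : e.Nodup) (hc : ∀ x ∈ l, x ∈ e) :
    ((l.countP c : Nat) : Int) = (e.map (fun q => if c q then (l.count q : Int) else 0)).sum := by
  induction l with
  | nil => simp
  | cons a l ih =>
    have hc' : ∀ x ∈ l, x ∈ e := fun x hx => hc x (List.mem_cons_of_mem a hx)
    have hsplit : (fun q => if c q then ((a :: l).count q : Int) else 0)
        = fun q => (if c q then (l.count q : Int) else 0) + (if q = a then (if c q then 1 else 0) else 0) := by
      funext q
      rw [List.count_cons]
      by_cases h1 : c q <;> by_cases h2 : q = a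
      · subst h2; simp [h1]
      · simp only [if_pos h1, if_neg h2, beq_iff_eq]
        rw [if_neg (fun h : a = q => h2 h.symm)]; push_cast; ring
      · subst h2; simp [h1]
      · simp [h1, h2]
    rw [hsplit, PySem.List.sum_map_add_int, ← ih hc',
        pv_sum_map_ite_eq_nodup e a _ hn (hc a (List.mem_cons_self ..))]
    rw [List.countP_cons]
    by_cases h : c a <;> simp [h]


-- the rank both programs assign to a person p: 1 + number of entries dominating p
theorem pv_rankA (l : List (Int × Int)) (p : Int × Int) :
    (PySem.List.pyRange 0 (l.length : Int) 1).foldl (fun rank y =>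
        if p.1 < (PySem.List.pyGetD l y ((0 : Int), (0 : Int))).1 ∧
           p.2 < (PySem.List.pyGetD l y ((0 : Int), (0 : Int))).2
        then rank + 1 else rank) 1
    = 1 + (l.countP (fun q => decide (p.1 < q.1 ∧ p.2 < q.2)) : Int) := by
  rw [PySem.List.foldl_pyRange_zero_pyGetD' l ((0 : Int), (0 : Int))
      (fun rank q => if p.1 < q.1 ∧ p.2 < q.2 then rank + 1 else rank) 1]
  exact PySem.List.foldl_ite_add_one _ _ _

theorem pv_getD_foldl_insert_not_mem (ds : List (Int × Int)) (F : (Int × Int) → Int)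
    (d : PySem.Dict (Int × Int) Int) (p : Int × Int) (hp : p ∉ ds) :
    (ds.foldl (fun d q => d.insert q (F q)) d).getD p 0 = d.getD p 0 := by
  induction ds generalizing d with
  | nil => rfl
  | cons q ds ih =>
    simp only [List.mem_cons, not_or] at hp
    rw [List.foldl_cons, ih (d.insert q (F q)) hp.2,
        PySem.Dict.getD_insert_of_ne d (F q) 0 hp.1]

theorem pv_getD_foldl_insert (ds : List (Int × Int)) (F : (Int × Int) → Int)
    (d : PySem.Dict (Int × Int) Int) (p : Int × Int) (hn : ds.Nodup) (hp : p ∈ ds) :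
    (ds.foldl (fun d q => d.insert q (F q)) d).getD p 0 = F p := by
  induction ds generalizing d with
  | nil => simp at hp
  | cons q ds ih =>
    simp only [List.nodup_cons] at hn
    rw [List.foldl_cons]
    rcases List.mem_cons.mp hp with rfl | hp'
    · rw [pv_getD_foldl_insert_not_mem ds F _ p hn.1, PySem.Dict.getD_insert_self]
    · exact ih (d.insert q (F q)) hn.2 hp'

-- B's rank_of lookup computes the same rank
theorem pv_rankB (l : List (Int × Int)) (p : Int × Int) (hp : p ∈ l) :
    ((PySem.Set.ofList l).foldl (fun d p' => d.insert p'
        ((PySem.Set.ofList l).foldl (fun r q =>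
          if p'.1 < q.1 ∧ p'.2 < q.2 then r + (PySem.Dict.counter l).getD q 0 else r) 1))
      PySem.Dict.empty).getD p 0
    = 1 + (l.countP (fun q => decide (p.1 < q.1 ∧ p.2 < q.2)) : Int) := by
  rw [pv_getD_foldl_insert (PySem.Set.ofList l) _ PySem.Dict.empty p
      (PySem.Set.nodup_ofList l) ((PySem.Set.mem_ofList l p).mpr hp)]
  have hbody : (fun (r : Int) (q : Int × Int) =>
        if p.1 < q.1 ∧ p.2 < q.2 then r + (PySem.Dict.counter l).getD q 0 else r)
      = fun r q => r + (if decide (p.1 < q.1 ∧ p.2 < q.2) then (l.count q : Int) else 0) := by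
    funext r q
    rw [PySem.Dict.getD_counter]
    by_cases hc : p.1 < q.1 ∧ p.2 < q.2 <;> simp [hc]
  rw [hbody, PySem.List.foldl_add,
      ← pv_grouping l (PySem.Set.ofList l) _ (PySem.Set.nodup_ofList l)
        (fun x hx => (PySem.Set.mem_ofList l x).mpr hx)]

theorem pv_fillA (g : Int → Int) : ∀ (m : Nat) (out : List Int), m ≤ out.length →
    (PySem.List.pyRange 0 (m : Int) 1).foldl (fun o x => PySem.List.pySetD o x (g x)) out
    = List.map (fun k : Nat => g (k : Int)) (List.range m) ++ out.drop m := by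
  intro m
  induction m with
  | zero => intro out h; simp [PySem.List.pyRange_one_eq_nil]
  | succ m ih =>
    intro out h
    have hm : m < out.length := by omega
    have hcast : ((m + 1 : Nat) : Int) = (m : Int) + 1 := by push_cast; ring
    rw [hcast, PySem.List.pyRange_one_succ_right (by positivity), List.foldl_append]
    rw [ih out (by omega)]
    simp only [List.foldl_cons, List.foldl_nil, PySem.List.pySetD_natCast]
    rw [List.drop_eq_getElem_cons hm, List.range_succ, List.map_append]
    have hlen : (List.map (fun k : Nat => g (k : Int)) (List.range m)).length = m := by simp
    rw [show (List.map (fun k : Nat => g (k : Int)) (List.range m) ++ out[m] :: out.drop (m+1)).set m (g m)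
        = List.map (fun k : Nat => g (k : Int)) (List.range m) ++ (out[m] :: out.drop (m+1)).set 0 (g m) by simp [hlen]]
    simp only [List.set_cons_zero, List.map_cons, List.map_nil]
    simp

theorem pv_fillB (h : (Int × Int) → Int) : ∀ (l : List (Int × Int)) (s : Nat) (out : List Int),
    s + l.length ≤ out.length →
    (PySem.List.enumerate l (s : Int)).foldl (fun o ip => PySem.List.pySetD o ip.1 (h ip.2)) out
    = out.take s ++ l.map h ++ out.drop (s + l.length) := by
  intro l
  induction l with
  | nil => intro s out hle; simp [PySem.List.enumerate_nil]
  | cons a l ih =>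
    intro s out hle
    simp only [List.length_cons] at hle
    have hs : s < out.length := by omega
    rw [PySem.List.enumerate_cons, List.foldl_cons]
    have hcast : (s : Int) + 1 = ((s + 1 : Nat) : Int) := by push_cast; ring
    rw [hcast]
    simp only [PySem.List.pySetD_natCast]
    rw [ih (s+1) (out.set s (h a)) (by simp; omega)]
    have htake : (out.set s (h a)).take (s+1) = out.take s ++ [h a] := by
      rw [List.set_eq_take_append_cons_drop, if_pos hs, List.take_append]
      simp [List.length_take, Nat.min_eq_left hs.le]
    have hdrop : (out.set s (h a)).drop (s + 1 + l.length) = out.drop (s + (l.length + 1)) := by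
      rw [List.drop_set_of_lt (by omega)]
      congr 1
      omega
    rw [htake, hdrop]
    simp

theorem pv_fillB0 (h : (Int × Int) → Int) (l : List (Int × Int)) (out : List Int)
    (hle : l.length ≤ out.length) :
    (PySem.List.enumerate l 0).foldl (fun o ip => PySem.List.pySetD o ip.1 (h ip.2)) out
    = l.map h ++ out.drop l.length := by
  have := pv_fillB h l 0 out (by omega)
  simpa using this

-- ===== VERDICT (by name: the statement is the Claim_ definition above) =====
theorem body_rank_spec : Claim_equal_body_rank := by
  intro n l _dom hpre
  unfold Pre_body_rank at hpre
  unfold Spec_body_rank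
  have hlen : l.length ≤ n.toNat := by omega
  show body_rank n l = body_rank_alt n l
  simp only [body_rank, body_rank_alt, PySem.Dict.foldl_insert_getD_add_one_eq_counter,
    PySem.Dict.keys_counter]
  rw [pv_fillA _ l.length (List.replicate n.toNat 0) (by simpa using hlen),
      pv_fillB0 (fun p =>
        ((PySem.Set.ofList l).foldl (fun d p' =>
            d.insert p' ((PySem.Set.ofList l).foldl (fun r q =>
              if p'.1 < q.1 ∧ p'.2 < q.2 then r + (PySem.Dict.counter l).getD q 0 else r) 1))
          PySem.Dict.empty).getD p 0) l (List.replicate n.toNat 0) (by simpa using hlen)]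
  congr 1
  apply List.ext_getElem (by simp)
  intro k hk1 hk2
  have hk : k < l.length := by simpa using hk2
  simp only [List.getElem_map, List.getElem_range]
  have hget : PySem.List.pyGetD l ((k : Nat) : Int) ((0 : Int), (0 : Int)) = l[k]'hk := by
    simp only [PySem.List.pyGetD_natCast]
    exact List.getD_eq_getElem l _ hk
  rw [hget, pv_rankA l (l[k]'hk), pv_rankB l (l[k]'hk) (List.getElem_mem hk)]
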